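-- pv_equiv track=rewrite | github.com/DKramer8/Jaffe_Annotation | classification.py | merge_to_string
-- ===== SOURCE A (Python) =====
-- def merge_to_string(l):
--     '''
--         Merges all strings of passed list and returns them
--     '''
--     text = []
--     for i, line in enumerate(l):
--         if line is not None:
--             if line.endswith('-'): # in case that line ends with unfinished word
--                 if i + 1 < len(l):
--                     l[i + 1] = line[:-1] + l[i + 1]
--             else:
--                 text.append(line)
--     result = ' '.join(text)
--     return result
-- ===== SOURCE B (Python) =====
-- def merge_to_string(l):
--     '''
--         Merges all strings of passed list and returns them
--     '''
--     text = []
--     carry = None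
--     n = len(l)
--     for i, line in enumerate(l):
--         if line is None and carry is None:
--             continue
--         if carry is not None:
--             line = carry + line  # raises TypeError if line is None, exactly as A does
--             carry = None
--         if line.endswith('-'):
--             if i + 1 < n:
--                 carry = line[:-1]
--             # else: dangling-hyphen last line is dropped, as in A
--         else:
--             text.append(line)
--     return ' '.join(text)
-- ===== Notes on version B (the rewrite author's own statement) =====
-- stated objective: simpler
-- what changed: B replaces A's in-place mutation of the next list cell (l[i+1] = line[:-1] + l[i+1]) by a single non-mutating forward pass with a local carry variable, so the input list is left untouched.
import Mathlib
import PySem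

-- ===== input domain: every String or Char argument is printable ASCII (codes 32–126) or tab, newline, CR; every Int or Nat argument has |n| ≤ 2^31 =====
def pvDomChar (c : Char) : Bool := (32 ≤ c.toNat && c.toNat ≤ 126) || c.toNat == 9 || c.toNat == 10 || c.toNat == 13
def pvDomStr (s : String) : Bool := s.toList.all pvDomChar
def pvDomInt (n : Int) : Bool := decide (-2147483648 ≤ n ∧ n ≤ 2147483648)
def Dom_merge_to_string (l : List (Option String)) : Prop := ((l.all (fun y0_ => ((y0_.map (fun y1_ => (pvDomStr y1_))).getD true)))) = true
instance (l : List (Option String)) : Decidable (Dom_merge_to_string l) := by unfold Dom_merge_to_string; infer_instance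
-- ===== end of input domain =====

-- B replaces A's in-place mutation of the next list cell by a non-mutating forward pass with a
-- local carry variable (simpler; equivalence is about the RETURN value only — A mutates its
-- argument list in place, B does not).


-- ===== PORT A =====
-- Strings are carried as List Char (PySem.Chars); 'line[:-1]' is List.dropLast
-- (= PySem.List.slice line none (some (-1)) by PySem.List.slice_to_neg_one).
-- A's loop, with the mutation 'l[i+1] = line[:-1] + l[i+1]' rendered as replacing the head of
-- the remaining list; 'i + 1 < len(l)' is 'rest ≠ []' since the list's length never changes.
def mtsGoA : List (Option (List Char)) → List (List Char) → List (List Char)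
  | [], text => text
  | none :: rest, text => mtsGoA rest text
  | some line :: rest, text =>
    if PySem.Chars.endswith line ['-'] then
      match rest with
      | [] => mtsGoA [] text
      | o :: rest' =>
        -- o = none: Python raises TypeError ('str' + None) here; excluded by Pre_
        mtsGoA (some (line.dropLast ++ o.getD []) :: rest') text
    else mtsGoA rest (text ++ [line])
  termination_by l _ => l.length
  decreasing_by all_goals simp

def merge_to_string (l : List (Option String)) : String :=
  String.ofList (PySem.Chars.join [' '] (mtsGoA (l.map (Option.map String.toList)) []))

-- ===== PORT B =====
-- Source B's loop: carry : Option (List Char), i the enumerate index, n = len(l), text the output.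
def mtsGoB : List (Option (List Char)) → Option (List Char) → Int → Int → List (List Char) → List (List Char)
  | [], _, _, _, text => text
  | o :: rest, carry, i, n, text =>
    match carry, o with
    | none, none => mtsGoB rest none (i + 1) n text        -- 'if line is None and carry is None: continue'
    | carry, o =>
      let line : List Char :=
        match carry with
        | none => o.getD []
        | some c => c ++ o.getD []                          -- o = none: Python raises TypeError; excluded by Pre_
      if PySem.Chars.endswith line ['-'] then
        if i + 1 < n then mtsGoB rest (some line.dropLast) (i + 1) n text
        else mtsGoB rest none (i + 1) n text
      else mtsGoB rest none (i + 1) n (text ++ [line])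

def merge_to_string_alt (l : List (Option String)) : String :=
  String.ofList (PySem.Chars.join [' '] (mtsGoB (l.map (Option.map String.toList)) none 0 (l.length : Int) []))

-- ===== PRECONDITION & SPEC =====
-- Tracks only the pending hyphen-carry: 'mtsDangling carry l = true' iff the chained
-- hyphen-carry ever reaches a None element, which is exactly where the Python (both A and B)
-- raises TypeError ('str' + None). Pre_ excludes precisely those inputs; both programs return
-- normally everywhere else.
def mtsDangling : Option (List Char) → List (Option (List Char)) → Bool
  | _, [] => false
  | some _, none :: _ => true
  | none, none :: rest => mtsDangling none rest
  | carry, some s :: rest =>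
    let t := carry.getD [] ++ s
    if PySem.Chars.endswith t ['-'] && !rest.isEmpty then mtsDangling (some t.dropLast) rest
    else mtsDangling none rest

def Pre_merge_to_string (l : List (Option String)) : Prop :=
  mtsDangling none (l.map (Option.map String.toList)) = false
instance (l : List (Option String)) : Decidable (Pre_merge_to_string l) := by
  unfold Pre_merge_to_string; infer_instance

def pvWitness_merge_to_string : List (Option String) := [some "ab-", some "cd", none, some "e"]

def Spec_merge_to_string (l : List (Option String)) (out : String) : Prop := out = merge_to_string_alt l
instance (l : List (Option String)) (out : String) : Decidable (Spec_merge_to_string l out) := by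
  unfold Spec_merge_to_string; infer_instance

-- ===== CLAIM (what is proved, stated in full; the proofs are below) =====
def Claim_equal_merge_to_string : Prop := ∀ (l : List (Option String)), Dom_merge_to_string l → Pre_merge_to_string l → Spec_merge_to_string l (merge_to_string l)

-- ===== LEMMAS AND PROOFS =====

-- A's destructive write 'l[i+1] = carry + l[i+1]' seen from B's side: apply the pending carry
-- to the head of the remaining list.
def mtsApplyCarry : Option (List Char) → List (Option (List Char)) → List (Option (List Char))
  | none, l => l
  | some _, [] => []
  | some c, o :: rest => some (c ++ o.getD []) :: rest

lemma mtsGo_eq (l : List (Option (List Char))) :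
    ∀ (carry : Option (List Char)) (i n : Int) (text : List (List Char)),
      mtsDangling carry l = false → n = i + l.length →
      mtsGoB l carry i n text = mtsGoA (mtsApplyCarry carry l) text := by
  induction l with
  | nil =>
    intro carry i n text _ _
    cases carry <;> simp [mtsGoB, mtsApplyCarry, mtsGoA]
  | cons o rest ih =>
    intro carry i n text hd hn
    have hlen : n = (i + 1) + rest.length := by simp at hn; omega
    cases carry with
    | none =>
      cases o with
      | none =>
        have hd' : mtsDangling none rest = false := by simpa [mtsDangling] using hd
        simp only [mtsGoB, mtsApplyCarry, mtsGoA]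
        simpa [mtsApplyCarry] using ih none (i + 1) n text hd' hlen
      | some s =>
        simp only [mtsGoB, Option.getD]
        by_cases he : PySem.Chars.endswith s ['-'] = true
        · cases rest with
          | nil =>
            have : ¬ i + 1 < n := by simp at hn; omega
            simp [he, this, mtsGoB, mtsApplyCarry, mtsGoA]
          | cons o' rest' =>
            have hlt : i + 1 < n := by simp at hlen; omega
            have hd' : mtsDangling (some s.dropLast) (o' :: rest') = false := by
              simpa [mtsDangling, he] using hd
            simp only [he, if_pos hlt, mtsApplyCarry, mtsGoA]
            simpa [mtsApplyCarry] using ih (some s.dropLast) (i + 1) n text hd' hlen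
        · have hd' : mtsDangling none rest = false := by
            simpa [mtsDangling, he] using hd
          have hA : mtsGoA (some s :: rest) text = mtsGoA rest (text ++ [s]) := by
            cases rest <;> simp [mtsGoA, he]
          simp only [if_neg he, mtsApplyCarry]
          rw [hA]
          exact ih none (i + 1) n (text ++ [s]) hd' hlen
    | some c =>
      cases o with
      | none => simp [mtsDangling] at hd
      | some s =>
        simp only [mtsGoB, Option.getD, mtsApplyCarry]
        by_cases he : PySem.Chars.endswith (c ++ s) ['-'] = true
        · cases rest with
          | nil =>
            have : ¬ i + 1 < n := by simp at hn; omega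
            simp [he, this, mtsGoB, mtsGoA]
          | cons o' rest' =>
            have hlt : i + 1 < n := by simp at hlen; omega
            have hd' : mtsDangling (some (c ++ s).dropLast) (o' :: rest') = false := by
              simpa [mtsDangling, he] using hd
            simp only [he, if_pos hlt, mtsGoA]
            simpa [mtsApplyCarry] using ih (some (c ++ s).dropLast) (i + 1) n text hd' hlen
        · have hd' : mtsDangling none rest = false := by
            simpa [mtsDangling, he] using hd
          have hA : mtsGoA (some (c ++ s) :: rest) text = mtsGoA rest (text ++ [c ++ s]) := by
            cases rest <;> simp [mtsGoA, he]
          simp only [if_neg he]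
          rw [hA]
          exact ih none (i + 1) n (text ++ [c ++ s]) hd' hlen

-- ===== VERDICT (by name: the statement is the Claim_ definition above) =====
theorem merge_to_string_spec : Claim_equal_merge_to_string := by
  intro l _ hpre
  unfold Spec_merge_to_string merge_to_string merge_to_string_alt
  have h := mtsGo_eq (l.map (Option.map String.toList)) none 0 (l.length : Int) [] hpre
    (by simp)
  rw [h]
  rfl
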